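-- pv_equiv track=rewrite | github.com/mdovwagner/connect4 | game.py | connectedFour
-- ===== SOURCE A (Python) =====
-- def connectedFour(L):
--     count = 0
--     for cell in L:
--         if cell == 1:
--             count +=1
--             if count == 4:
--                 return 1
--         else:
--             count = 0
--     return 0
-- ===== SOURCE B (Python) =====
-- def connectedFour(L):
--     for a, b, c, d in zip(L, L[1:], L[2:], L[3:]):
--         if a == 1 and b == 1 and c == 1 and d == 1:
--             return 1
--     return 0
-- ===== Notes on version B (the rewrite author's own statement) =====
-- stated objective: alternative
-- what changed: Replaces the running-counter-with-reset scan by a sliding-window scan: zip the list with its three shifted copies and return 1 on the first all-ones window of four.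
import Mathlib
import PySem

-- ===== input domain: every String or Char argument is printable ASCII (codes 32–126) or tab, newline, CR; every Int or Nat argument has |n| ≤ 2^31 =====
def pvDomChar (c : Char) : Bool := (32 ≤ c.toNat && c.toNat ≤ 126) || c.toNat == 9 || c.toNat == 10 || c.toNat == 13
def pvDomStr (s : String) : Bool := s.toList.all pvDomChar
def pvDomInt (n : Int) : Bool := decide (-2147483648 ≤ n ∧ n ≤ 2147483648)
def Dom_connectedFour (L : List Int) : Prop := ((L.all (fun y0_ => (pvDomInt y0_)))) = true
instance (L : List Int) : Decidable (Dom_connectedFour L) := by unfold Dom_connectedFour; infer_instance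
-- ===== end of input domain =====

-- B replaces A's running counter with a sliding-window scan over suffixes (alternative decomposition, same cost class).


-- ===== PORT A =====
-- A: single pass with a running counter that resets on non-1 and returns 1 once it reaches 4.
def connectedFourGo : List Int → Int → Int
  | [], _ => 0
  | cell :: t, count =>
    if cell = 1 then
      if count + 1 = 4 then 1 else connectedFourGo t (count + 1)
    else connectedFourGo t 0

def connectedFour (L : List Int) : Int := connectedFourGo L 0

-- ===== PORT B =====
-- B: zip the list with its three shifted copies (L[k:] with k ≥ 0 is List.drop k, exact)
-- and return 1 iff some window of four consecutive cells is all ones (the for-loop with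
-- early return over pure tests is List.any).
def connectedFour_alt (L : List Int) : Int :=
  if (L.zip ((L.drop 1).zip ((L.drop 2).zip (L.drop 3)))).any
      (fun q => q.1 == 1 && q.2.1 == 1 && q.2.2.1 == 1 && q.2.2.2 == 1)
  then 1 else 0

-- ===== PRECONDITION & SPEC =====
def Spec_connectedFour (L : List Int) (out : Int) : Prop := out = connectedFour_alt L
instance (L : List Int) (out : Int) : Decidable (Spec_connectedFour L out) := by unfold Spec_connectedFour; infer_instance

-- ===== CLAIM (what is proved, stated in full; the proofs are below) =====
def Claim_equal_connectedFour : Prop := ∀ (L : List Int), Dom_connectedFour L → Spec_connectedFour L (connectedFour L)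

-- ===== LEMMAS AND PROOFS =====

-- proof-side helper: the window scan phrased as a recursion over suffixes
def sfx : List Int → Int
  | a :: b :: c :: d :: t =>
    if a = 1 ∧ b = 1 ∧ c = 1 ∧ d = 1 then 1 else sfx (b :: c :: d :: t)
  | _ => 0
termination_by L => L.length
decreasing_by simp

-- the zip-based port equals the suffix recursion
theorem alt_eq_sfx (L : List Int) : connectedFour_alt L = sfx L := by
  induction L using sfx.induct with
  | case1 a b c d t h =>
    rw [sfx, if_pos h, connectedFour_alt]
    simp [h.1, h.2.1, h.2.2.1, h.2.2.2]
  | case2 a b c d t h ih =>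
    rw [sfx, if_neg h, ← ih, connectedFour_alt, connectedFour_alt]
    have h' : ¬(((a = 1 ∧ b = 1) ∧ c = 1) ∧ d = 1) := by tauto
    simp only [List.drop, List.zip_cons_cons, List.any_cons]
    simp [h']
  | case3 L hL =>
    rw [sfx.eq_def]
    match L, hL with
    | [], _ => simp [connectedFour_alt]
    | [a], _ => simp [connectedFour_alt]
    | [a,b], _ => simp [connectedFour_alt]
    | [a,b,c], _ => simp [connectedFour_alt]
    | a :: b :: c :: d :: t, hL => exact absurd rfl (hL a b c d t)

-- alt of a list with fewer than 4 elements is 0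
theorem alt_short (L : List Int) (h : L.length < 4) : sfx L = 0 := by
  match L, h with
  | [], _ => simp [sfx]
  | [a], _ => simp [sfx]
  | [a, b], _ => simp [sfx]
  | [a, b, c], _ => simp [sfx]

-- a leading non-1 cell can be dropped
theorem alt_skip0 (c : Int) (t : List Int) (hc : c ≠ 1) :
    sfx (c :: t) = sfx t := by
  match t with
  | [] => simp [sfx]
  | [a] => simp [sfx]
  | [a, b] => simp [sfx]
  | a :: b :: d :: t' => rw [sfx]; simp [hc]

theorem alt_skip1 (c : Int) (t : List Int) (hc : c ≠ 1) :
    sfx (1 :: c :: t) = sfx t := by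
  match t with
  | [] => simp [sfx]
  | [a] => simp [sfx]
  | a :: b :: t' =>
    rw [sfx, if_neg (by simp [hc]), alt_skip0 c _ hc]

theorem alt_skip2 (c : Int) (t : List Int) (hc : c ≠ 1) :
    sfx (1 :: 1 :: c :: t) = sfx t := by
  match t with
  | [] => simp [sfx]
  | a :: t' =>
    rw [sfx, if_neg (by simp [hc]), alt_skip1 c _ hc]

theorem alt_skip3 (c : Int) (t : List Int) (hc : c ≠ 1) :
    sfx (1 :: 1 :: 1 :: c :: t) = sfx t := by
  rw [sfx, if_neg (by simp [hc]), alt_skip2 c _ hc]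

-- dropping up to three leading ones followed by a non-1 cell
theorem alt_skip (k : Nat) (c : Int) (t : List Int) (hc : c ≠ 1) (hk : k ≤ 3) :
    sfx (List.replicate k 1 ++ c :: t) = sfx t := by
  interval_cases k
  · simpa using alt_skip0 c t hc
  · simpa [List.replicate] using alt_skip1 c t hc
  · simpa [List.replicate] using alt_skip2 c t hc
  · simpa [List.replicate] using alt_skip3 c t hc

-- main invariant: the counter scan with k ones already seen equals alt on k prepended ones
theorem go_alt (L : List Int) : ∀ (k : Nat), k ≤ 3 →
    connectedFourGo L (k : Int) = sfx (List.replicate k 1 ++ L) := by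
  induction L with
  | nil =>
    intro k hk
    rw [connectedFourGo, alt_short]
    simp; omega
  | cons c t ih =>
    intro k hk
    rw [connectedFourGo]
    by_cases hc : c = 1
    · subst hc
      by_cases h4 : k = 3
      · subst h4
        rw [if_pos rfl, if_pos (by norm_num : ((3:Nat):Int) + 1 = 4)]
        have hrep : List.replicate 3 (1:Int) ++ 1 :: t = 1 :: 1 :: 1 :: 1 :: t := by
          simp [List.replicate]
        rw [hrep, sfx]
        simp
      · have hk2 : k ≤ 2 := by omega
        have hne : (k : Int) + 1 ≠ 4 := by omega
        rw [if_neg hne]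
        have : ((k : Int) + 1) = ((k + 1 : Nat) : Int) := by push_cast; ring
        rw [this, ih (k + 1) (by omega), List.replicate_succ']
        simp
    · rw [if_neg hc]
      have := ih 0 (by omega)
      simp only [Nat.cast_zero] at this
      rw [this]
      simp only [List.replicate_zero, List.nil_append]
      exact (alt_skip k c t hc hk).symm

-- ===== VERDICT (by name: the statement is the Claim_ definition above) =====
theorem connectedFour_spec : Claim_equal_connectedFour := by
  intro L _
  unfold Spec_connectedFour connectedFour
  rw [alt_eq_sfx]
  have := go_alt L 0 (by omega)
  simpa using this
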